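-- pv_equiv track=rewrite | github.com/Cortys/rankgnn | src/rgnn/metrics/rank.py | bucked_sorted_list_to_ranking
-- ===== SOURCE A (Python) =====
-- def bucked_sorted_list_to_ranking(objects, object_ranks, predicted_ordering):
--   lut = dict(zip(objects, object_ranks))
--   real_ranks = []
--   predicted_ranks = []
--
--   curr_object_rank = None
--   curr_pred_rank = -1
--
--   for o in predicted_ordering:
--     o_rank = lut[o]
--
--     if curr_object_rank != o_rank:
--       curr_object_rank = o_rank
--       curr_pred_rank += 1
--
--     real_ranks.append(o_rank)
--     predicted_ranks.append(curr_pred_rank)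
--
--   return predicted_ranks, real_ranks
-- ===== SOURCE B (Python) =====
-- def bucked_sorted_list_to_ranking(objects, object_ranks, predicted_ordering):
--   lut = dict(zip(objects, object_ranks))
--   real_ranks = [lut[o] for o in predicted_ordering]
--   if real_ranks:
--     changes = [0] + [1 if a != b else 0 for a, b in zip(real_ranks, real_ranks[1:])]
--   else:
--     changes = []
--   predicted_ranks = []
--   total = 0
--   for c in changes:
--     total += c
--     predicted_ranks.append(total)
--   return predicted_ranks, real_ranks
-- ===== Notes on version B (the rewrite author's own statement) =====
-- stated objective: alternative
-- what changed: A interleaves lookup, bucket tracking (Option sentinel + running counter) and both outputs in one stateful loop; B first maps the rank lookup over the ordering, then derives a 0/1 adjacent-change list by zipping the rank list with its own tail, and prefix-sums that list to get the predicted ranks.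
import Mathlib
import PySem

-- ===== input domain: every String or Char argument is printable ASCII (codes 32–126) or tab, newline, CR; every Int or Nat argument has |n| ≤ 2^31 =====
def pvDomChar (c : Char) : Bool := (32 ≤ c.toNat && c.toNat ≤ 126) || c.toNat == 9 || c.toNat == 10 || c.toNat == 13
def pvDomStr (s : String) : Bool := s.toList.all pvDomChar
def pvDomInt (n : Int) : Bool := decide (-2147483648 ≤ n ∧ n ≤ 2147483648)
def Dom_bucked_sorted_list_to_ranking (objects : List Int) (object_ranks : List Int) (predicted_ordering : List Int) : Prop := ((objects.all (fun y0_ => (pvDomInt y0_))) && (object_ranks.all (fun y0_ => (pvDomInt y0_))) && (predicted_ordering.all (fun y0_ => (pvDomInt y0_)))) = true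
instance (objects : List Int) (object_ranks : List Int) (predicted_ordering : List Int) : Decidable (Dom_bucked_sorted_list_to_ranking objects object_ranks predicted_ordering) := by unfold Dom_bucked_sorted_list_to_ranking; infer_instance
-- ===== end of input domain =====

-- B replaces A's single stateful loop (Option sentinel + counter) by three passes:
-- a rank-lookup map, an adjacent-change 0/1 list, and a prefix sum; same cost, different structure.

-- ===== PORT A =====
-- state = (real_ranks, predicted_ranks, curr_object_rank, curr_pred_rank); lut[o] via getD 0, total under Pre_
def aStep (lut : PySem.Dict Int Int) (s : List Int × List Int × Option Int × Int) (o : Int) :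
    List Int × List Int × Option Int × Int :=
  let o_rank := (lut.get? o).getD 0
  if s.2.2.1 ≠ some o_rank then
    (s.1 ++ [o_rank], s.2.1 ++ [s.2.2.2 + 1], some o_rank, s.2.2.2 + 1)
  else
    (s.1 ++ [o_rank], s.2.1 ++ [s.2.2.2], s.2.2.1, s.2.2.2)

def bucked_sorted_list_to_ranking (objects : List Int) (object_ranks : List Int) (predicted_ordering : List Int) : List Int × List Int :=
  let lut := PySem.Dict.ofList (objects.zip object_ranks)
  let st := predicted_ordering.foldl (aStep lut) ([], [], none, -1)
  (st.2.1, st.1)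

-- ===== PORT B =====
-- prefix-sum loop state = (predicted_ranks, total)
def bSumStep (s : List Int × Int) (c : Int) : List Int × Int := (s.1 ++ [s.2 + c], s.2 + c)

def bucked_sorted_list_to_ranking_alt (objects : List Int) (object_ranks : List Int) (predicted_ordering : List Int) : List Int × List Int :=
  let lut := PySem.Dict.ofList (objects.zip object_ranks)
  let real_ranks := predicted_ordering.map (fun o => (lut.get? o).getD 0)
  let changes :=
    match real_ranks with
    | [] => []
    | _ :: tl => 0 :: List.zipWith (fun a b => if a ≠ b then (1 : Int) else 0) real_ranks tl
  let pred := (changes.foldl bSumStep ([], 0)).1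
  (pred, real_ranks)

-- ===== PRECONDITION & SPEC =====
-- Pre_ excludes exactly the inputs where Python A raises KeyError: some element of
-- predicted_ordering is not a key of dict(zip(objects, object_ranks)).
def Pre_bucked_sorted_list_to_ranking (objects : List Int) (object_ranks : List Int) (predicted_ordering : List Int) : Prop :=
  ∀ o ∈ predicted_ordering, o ∈ (objects.zip object_ranks).map Prod.fst
instance (objects : List Int) (object_ranks : List Int) (predicted_ordering : List Int) : Decidable (Pre_bucked_sorted_list_to_ranking objects object_ranks predicted_ordering) := by unfold Pre_bucked_sorted_list_to_ranking; infer_instance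

def pvWitness_bucked_sorted_list_to_ranking : List Int × List Int × List Int := ([1, 2, 3], [0, 0, 1], [2, 1, 3, 3])

def Spec_bucked_sorted_list_to_ranking (objects : List Int) (object_ranks : List Int) (predicted_ordering : List Int) (out : List Int × List Int) : Prop := out = bucked_sorted_list_to_ranking_alt objects object_ranks predicted_ordering
instance (objects : List Int) (object_ranks : List Int) (predicted_ordering : List Int) (out : List Int × List Int) : Decidable (Spec_bucked_sorted_list_to_ranking objects object_ranks predicted_ordering out) := by unfold Spec_bucked_sorted_list_to_ranking; infer_instance

-- ===== CLAIM (what is proved, stated in full; the proofs are below) =====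
def Claim_equal_bucked_sorted_list_to_ranking : Prop := ∀ (objects : List Int) (object_ranks : List Int) (predicted_ordering : List Int), Dom_bucked_sorted_list_to_ranking objects object_ranks predicted_ordering → Pre_bucked_sorted_list_to_ranking objects object_ranks predicted_ordering → Spec_bucked_sorted_list_to_ranking objects object_ranks predicted_ordering (bucked_sorted_list_to_ranking objects object_ranks predicted_ordering)

-- ===== LEMMAS AND PROOFS =====

-- the predicted-rank sequence produced from a current bucket value and counter over a list of real ranks
def specPred (curr : Option Int) (cpr : Int) : List Int → List Int
  | [] => []
  | r :: rest =>
    if curr ≠ some r then (cpr + 1) :: specPred (some r) (cpr + 1) rest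
    else cpr :: specPred curr cpr rest

-- prefix sums starting from a running total
def psFrom (t : Int) : List Int → List Int
  | [] => []
  | c :: cs => (t + c) :: psFrom (t + c) cs

theorem foldA_eq (lut : PySem.Dict Int Int) :
    ∀ (l ra pa : List Int) (curr : Option Int) (cpr : Int),
    ∃ c' p',
      l.foldl (aStep lut) (ra, pa, curr, cpr)
        = (ra ++ l.map (fun o => (lut.get? o).getD 0),
           pa ++ specPred curr cpr (l.map (fun o => (lut.get? o).getD 0)), c', p') := by
  intro l
  induction l with
  | nil => intro ra pa curr cpr; exact ⟨curr, cpr, by simp [specPred]⟩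
  | cons o rest ih =>
    intro ra pa curr cpr
    simp only [List.foldl_cons, List.map_cons, aStep]
    by_cases h : curr = some ((lut.get? o).getD 0)
    · subst h
      rw [if_neg (by simp)]
      obtain ⟨c', p', heq⟩ := ih (ra ++ [(lut.get? o).getD 0]) (pa ++ [cpr]) (some ((lut.get? o).getD 0)) cpr
      exact ⟨c', p', by rw [heq]; simp [specPred]⟩
    · rw [if_pos (show curr ≠ some ((lut.get? o).getD 0) from h)]
      obtain ⟨c', p', heq⟩ := ih (ra ++ [(lut.get? o).getD 0]) (pa ++ [cpr + 1]) (some ((lut.get? o).getD 0)) (cpr + 1)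
      exact ⟨c', p', by rw [heq]; simp [specPred, h]⟩

theorem foldSum_eq : ∀ (cs acc : List Int) (t : Int),
    (cs.foldl bSumStep (acc, t)).1 = acc ++ psFrom t cs := by
  intro cs
  induction cs with
  | nil => intro acc t; simp [psFrom]
  | cons c cs ih => intro acc t; simp only [List.foldl_cons, bSumStep, psFrom, ih, List.append_assoc, List.singleton_append]

theorem psFrom_zip_eq_specPred : ∀ (rest : List Int) (p t : Int),
    psFrom t (List.zipWith (fun a b => if a ≠ b then (1 : Int) else 0) (p :: rest) rest)
      = specPred (some p) t rest := by
  intro rest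
  induction rest with
  | nil => intro p t; simp [psFrom, specPred]
  | cons r rest ih =>
    intro p t
    simp only [List.zipWith_cons_cons, psFrom, specPred, ih]
    by_cases h : p = r
    · subst h; simp
    · simp [h]

-- ===== VERDICT (by name: the statement is the Claim_ definition above) =====
theorem bucked_sorted_list_to_ranking_spec : Claim_equal_bucked_sorted_list_to_ranking := by
  intro objects object_ranks predicted_ordering _ _
  unfold Spec_bucked_sorted_list_to_ranking
  unfold bucked_sorted_list_to_ranking bucked_sorted_list_to_ranking_alt
  set lut := PySem.Dict.ofList (objects.zip object_ranks) with hlut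
  obtain ⟨c', p', hA⟩ := foldA_eq lut predicted_ordering [] [] none (-1)
  simp only [hA, List.nil_append]
  set real := predicted_ordering.map (fun o => (lut.get? o).getD 0) with hreal
  cases real with
  | nil => simp [specPred]
  | cons r tl =>
    simp only [foldSum_eq, List.nil_append, psFrom, specPred]
    rw [psFrom_zip_eq_specPred]
    simp
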